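-- pv_equiv track=rewrite | github.com/ryantanbingyang/cpsc474-assignment1 | code/python/cribbage.py | is_legal_split
-- ===== SOURCE A (Python) =====
-- def is_legal_split(hand, split):
--     """ Determines if split is a partition of hand.
--
--         hand -- an iterable over cards
--         split -- an iterable over iterables of cards
--     """
--     # count cards in hand
--     card_count = dict()
--     for c in hand:
--         if c not in card_count:
--             card_count[c] = 1
--         else:
--             card_count[c] += 1
--
--     # match cards in partition with cards in hand
--     part_size = 0
--     for part in split:
--         part_size += len(part)
--         for c in part:
--             if c not in card_count or card_count[c] == 0:
--                 # card in partition not in hand, or too many in partition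
--                 return False
--             card_count[c] -= 1
--
--     # if no problems yet, everything must have matched
--     return part_size == len(hand)
-- ===== SOURCE B (Python) =====
-- def is_legal_split(hand, split):
--     """ Determines if split is a partition of hand.
--
--         hand -- an iterable over cards
--         split -- an iterable over iterables of cards
--     """
--     def tally(cards):
--         counts = {}
--         for c in cards:
--             counts[c] = counts.get(c, 0) + 1
--         return counts
--     return tally(hand) == tally(c for part in split for c in part)
-- ===== Notes on version B (the rewrite author's own statement) =====
-- stated objective: simpler
-- what changed: B tabulates the hand and the flattened split into two independent count dicts and returns their equality, instead of A's interleaved decrement of a single dict with early exits and a separate size check.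
import Mathlib
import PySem

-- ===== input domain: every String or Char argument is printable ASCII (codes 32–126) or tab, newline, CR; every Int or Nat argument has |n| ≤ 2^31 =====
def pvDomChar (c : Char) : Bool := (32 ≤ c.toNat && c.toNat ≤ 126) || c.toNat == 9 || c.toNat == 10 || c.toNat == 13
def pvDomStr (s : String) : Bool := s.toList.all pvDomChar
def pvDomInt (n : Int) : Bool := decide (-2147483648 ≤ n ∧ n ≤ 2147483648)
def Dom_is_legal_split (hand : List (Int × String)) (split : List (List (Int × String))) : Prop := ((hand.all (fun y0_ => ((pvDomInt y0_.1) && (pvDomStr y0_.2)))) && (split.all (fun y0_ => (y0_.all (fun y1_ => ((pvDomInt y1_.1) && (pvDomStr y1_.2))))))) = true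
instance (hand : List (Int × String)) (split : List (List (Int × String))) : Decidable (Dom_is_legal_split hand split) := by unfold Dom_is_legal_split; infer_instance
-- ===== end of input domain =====

-- B replaces A's interleaved decrement-with-early-exit by two independent count dicts compared for equality (objective: simpler).

-- ===== PORT A =====
-- inner loop 'for c in part: …' with the early 'return False' as Option (none = returned False)
def pvInnerA (d : PySem.Dict (Int × String) Int) (part : List (Int × String)) :
    Option (PySem.Dict (Int × String) Int) :=
  match part with
  | [] => some d
  | c :: rest =>
    if !d.contains c || d.getD c 0 == 0 then none
    else pvInnerA (d.modify c 0 (· - 1)) rest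

-- outer loop 'for part in split: part_size += len(part); …'
def pvOuterA (d : PySem.Dict (Int × String) Int) (split : List (List (Int × String)))
    (partSize : Int) : Option Int :=
  match split with
  | [] => some partSize
  | part :: rest =>
    match pvInnerA d part with
    | none => none
    | some d' => pvOuterA d' rest (partSize + (part.length : Int))

def is_legal_split (hand : List (Int × String)) (split : List (List (Int × String))) : Bool :=
  let card_count := hand.foldl
    (fun d c => if !d.contains c then d.insert c 1 else d.modify c 0 (· + 1))
    PySem.Dict.empty
  match pvOuterA card_count split 0 with
  | none => false
  | some part_size => part_size == (hand.length : Int)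

-- ===== PORT B =====
-- B's tally(): counts[c] = counts.get(c, 0) + 1
def pvTally (cards : List (Int × String)) : PySem.Dict (Int × String) Int :=
  cards.foldl (fun d c => d.insert c (d.getD c 0 + 1)) PySem.Dict.empty

-- Python's 'dict == dict': same key-value mapping, insertion order ignored
def pvDictEq (d1 d2 : PySem.Dict (Int × String) Int) : Bool :=
  d1.items.all (fun p => d2.get? p.1 == some p.2) &&
  d2.items.all (fun p => d1.get? p.1 == some p.2)

def is_legal_split_alt (hand : List (Int × String)) (split : List (List (Int × String))) : Bool :=
  pvDictEq (pvTally hand) (pvTally (split.flatMap id))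

-- ===== PRECONDITION & SPEC =====
def Spec_is_legal_split (hand : List (Int × String)) (split : List (List (Int × String))) (out : Bool) : Prop := out = is_legal_split_alt hand split
instance (hand : List (Int × String)) (split : List (List (Int × String))) (out : Bool) : Decidable (Spec_is_legal_split hand split out) := by unfold Spec_is_legal_split; infer_instance

-- ===== CLAIM (what is proved, stated in full; the proofs are below) =====
def Claim_equal_is_legal_split : Prop := ∀ (hand : List (Int × String)) (split : List (List (Int × String))), Dom_is_legal_split hand split → Spec_is_legal_split hand split (is_legal_split hand split)

-- ===== LEMMAS AND PROOFS =====

theorem pv_inner_append (d : PySem.Dict (Int × String) Int) (xs ys : List (Int × String)) :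
    pvInnerA d (xs ++ ys) = (pvInnerA d xs).bind (fun d' => pvInnerA d' ys) := by
  induction xs generalizing d with
  | nil => simp [pvInnerA]
  | cons c rest ih =>
    simp only [List.cons_append, pvInnerA]
    split
    · rfl
    · exact ih _

theorem pv_outer_eq_inner (split : List (List (Int × String)))
    (d : PySem.Dict (Int × String) Int) (s : Int) :
    pvOuterA d split s =
      (pvInnerA d (split.flatMap id)).map (fun _ => s + ((split.flatMap id).length : Int)) := by
  induction split generalizing d s with
  | nil => simp [pvOuterA, pvInnerA]
  | cons part rest ih =>
    simp only [List.flatMap_cons, id_eq, pv_inner_append, pvOuterA]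
    cases h : pvInnerA d part with
    | none => simp
    | some d' =>
      have hih := ih d' (s + (part.length : Int))
      simp only [Option.bind, hih, List.length_append]
      cases pvInnerA d' (rest.flatMap id) <;> simp <;> try ring

-- the decrement loop succeeds iff no card is overdrawn
theorem pv_inner_spec (l : List (Int × String)) (d : PySem.Dict (Int × String) Int)
    (hnd : d.keys.Nodup) (hpos : ∀ c, 0 ≤ d.getD c 0) :
    (pvInnerA d l).isSome = true ↔ ∀ c, (l.count c : Int) ≤ d.getD c 0 := by
  induction l generalizing d with
  | nil =>
    refine iff_of_true rfl ?_
    intro c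
    simpa using hpos c
  | cons c rest ih =>
    by_cases hz : d.getD c 0 = 0
    · have hcond : (!d.contains c || d.getD c 0 == 0) = true := by simp [hz]
      simp only [pvInnerA, hcond, if_true]
      refine iff_of_false (by simp) ?_
      intro h
      have hc := h c
      rw [List.count_cons_self, hz] at hc
      push_cast at hc
      omega
    · have hc : d.contains c = true := by
        by_contra hcf
        have hf : d.contains c = false := by simpa using hcf
        have h0 : d.getD c 0 = 0 := by simp [PySem.Dict.getD_of_not_contains, hf]
        exact hz h0
      have hcond : (!d.contains c || d.getD c 0 == 0) = false := by simp [hc, hz]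
      simp only [pvInnerA, hcond, Bool.false_eq_true, if_false]
      have hnd' : (d.modify c 0 (· - 1)).keys.Nodup := by
        simpa [PySem.Dict.keys_modify, PySem.Dict.keys_insert_of_contains, hc] using hnd
      have hpos' : ∀ x, 0 ≤ (d.modify c 0 (· - 1)).getD x 0 := by
        intro x
        rw [PySem.Dict.getD_modify]
        split_ifs with hx
        · have := hpos c; omega
        · exact hpos x
      rw [ih _ hnd' hpos']
      constructor
      · intro H x
        have hH := H x
        rw [PySem.Dict.getD_modify] at hH
        rw [List.count_cons]
        by_cases hx : x = c
        · subst hx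
          simp only [beq_self_eq_true, if_true] at hH ⊢

          push_cast at hH ⊢
          omega
        · simp only [if_neg hx, beq_iff_eq, if_neg (Ne.symm hx)] at hH ⊢
          push_cast at hH ⊢
          omega
      · intro H x
        rw [PySem.Dict.getD_modify]
        have hH := H x
        rw [List.count_cons] at hH
        by_cases hx : x = c
        · subst hx
          simp only [beq_self_eq_true, if_true] at hH ⊢

          push_cast at hH ⊢
          omega
        · simp only [if_neg hx, beq_iff_eq, if_neg (Ne.symm hx)] at hH ⊢
          push_cast at hH ⊢
          omega

theorem pv_tally_eq_counter (cards : List (Int × String)) :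
    pvTally cards = PySem.Dict.counter cards :=
  PySem.Dict.foldl_insert_getD_add_one_eq_counter cards

theorem pv_card_count_eq_counter (hand : List (Int × String)) :
    hand.foldl (fun d c => if !d.contains c then d.insert c 1 else d.modify c 0 (· + 1))
      PySem.Dict.empty = PySem.Dict.counter hand := by
  have hf : (fun (d : PySem.Dict (Int × String) Int) (c : Int × String) =>
      if !d.contains c then d.insert c 1 else d.modify c 0 (· + 1)) =
      (fun d c => d.modify c 0 (· + 1)) := by
    funext d c
    by_cases h : d.contains c
    · simp [h]
    · have hf' : d.contains c = false := by simpa using h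
      have h0 : d.getD c 0 = 0 := by simp [PySem.Dict.getD_of_not_contains, hf']
      simp [hf', PySem.Dict.modify, h0]
  rw [hf]
  rfl

theorem pv_get?_counter (xs : List (Int × String)) (c : Int × String) :
    (PySem.Dict.counter xs).get? c = if c ∈ xs then some ((xs.count c : Int)) else none := by
  by_cases hm : c ∈ xs
  · rw [if_pos hm]
    apply PySem.Dict.get?_of_mem_items
    · rw [PySem.Dict.items_counter]
      exact List.mem_map.mpr ⟨c, by simpa using hm, rfl⟩
    · exact PySem.Dict.nodup_keys_counter xs
  · rw [if_neg hm]
    rw [PySem.Dict.get?_eq_none_iff_not_mem_keys, PySem.Dict.keys_counter]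
    exact fun h => hm (by simpa using h)

theorem pv_dictEq_counter (xs ys : List (Int × String)) :
    pvDictEq (PySem.Dict.counter xs) (PySem.Dict.counter ys) = true ↔
      ∀ c, xs.count c = ys.count c := by
  unfold pvDictEq
  rw [Bool.and_eq_true, List.all_eq_true, List.all_eq_true]
  constructor
  · rintro ⟨H1, H2⟩ c
    by_cases hx : c ∈ xs
    · have hmem : (c, (xs.count c : Int)) ∈ (PySem.Dict.counter xs).items := by
        rw [PySem.Dict.items_counter]
        exact List.mem_map.mpr ⟨c, by simpa using hx, rfl⟩
      have h1 := H1 _ hmem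
      rw [pv_get?_counter] at h1
      split_ifs at h1 with hy
      · simp at h1
        exact_mod_cast h1.symm
      · simp at h1
    · by_cases hy : c ∈ ys
      · have hmem : (c, (ys.count c : Int)) ∈ (PySem.Dict.counter ys).items := by
          rw [PySem.Dict.items_counter]
          exact List.mem_map.mpr ⟨c, by simpa using hy, rfl⟩
        have h2 := H2 _ hmem
        rw [pv_get?_counter, if_neg hx] at h2
        simp at h2
      · rw [List.count_eq_zero_of_not_mem hx, List.count_eq_zero_of_not_mem hy]
  · intro H
    constructor
    · intro p hp
      rw [PySem.Dict.items_counter] at hp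
      obtain ⟨k, hk, rfl⟩ := List.mem_map.mp hp
      have hkx : k ∈ xs := by simpa using hk
      have hky : k ∈ ys := by
        have h1 : 0 < xs.count k := List.count_pos_iff.mpr hkx
        have h2 := H k
        exact List.count_pos_iff.mp (by omega)
      rw [pv_get?_counter, if_pos hky, H k]
      simp
    · intro p hp
      rw [PySem.Dict.items_counter] at hp
      obtain ⟨k, hk, rfl⟩ := List.mem_map.mp hp
      have hky : k ∈ ys := by simpa using hk
      have hkx : k ∈ xs := by
        have h1 : 0 < ys.count k := List.count_pos_iff.mpr hky
        have h2 := H k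
        exact List.count_pos_iff.mp (by omega)
      rw [pv_get?_counter, if_pos hkx, H k]
      simp

theorem pv_counts_bridge (flat hand : List (Int × String))
    (hle : ∀ c, flat.count c ≤ hand.count c) :
    flat.length = hand.length ↔ ∀ c, hand.count c = flat.count c := by
  constructor
  · intro hlen c
    have hsub : List.Subperm flat hand := List.subperm_ext_iff.mpr (fun x _ => hle x)
    have hperm : flat.Perm hand := hsub.perm_of_length_le (by omega)
    exact (List.perm_iff_count.mp hperm c).symm
  · intro h
    have hperm : hand.Perm flat := List.perm_iff_count.mpr h
    exact hperm.length_eq.symm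

-- ===== VERDICT (by name: the statement is the Claim_ definition above) =====
theorem is_legal_split_spec : Claim_equal_is_legal_split := by
  intro hand split _
  show is_legal_split hand split = is_legal_split_alt hand split
  simp only [is_legal_split, is_legal_split_alt]
  rw [pv_card_count_eq_counter, pv_tally_eq_counter, pv_tally_eq_counter, pv_outer_eq_inner]
  have hspec := pv_inner_spec (split.flatMap id) (PySem.Dict.counter hand)
      (PySem.Dict.nodup_keys_counter hand)
      (fun c => by simp [PySem.Dict.getD_counter])
  rw [Bool.eq_iff_iff, pv_dictEq_counter]
  cases hF : pvInnerA (PySem.Dict.counter hand) (split.flatMap id) with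
  | none =>
    refine iff_of_false (by simp) ?_
    intro hall
    have h2 := hspec.mpr (fun c => by
      rw [PySem.Dict.getD_counter]
      exact_mod_cast (hall c).symm.le)
    rw [hF] at h2
    simp at h2
  | some d' =>
    have hle : ∀ c, (split.flatMap id).count c ≤ hand.count c := by
      intro c
      have h := hspec.mp (by rw [hF]; rfl) c
      rw [PySem.Dict.getD_counter] at h
      exact_mod_cast h
    simp only [Option.map_some]
    rw [beq_iff_eq, ← pv_counts_bridge (split.flatMap id) hand hle]
    constructor <;> intro h <;> omega
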